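-- pv_equiv track=rewrite | github.com/DanialRavan/Cryptolyst | decoders.py | decode_rot18
-- ===== SOURCE A (Python) =====
-- def decode_rot18(ciphertext):
--     def _rot_char(char):
--         if 'a' <= char <= 'z':
--             return chr((ord(char) - ord('a') + 13) % 26 + ord('a'))
--         if 'A' <= char <= 'Z':
--             return chr((ord(char) - ord('A') + 13) % 26 + ord('A'))
--         if '0' <= char <= '9':
--             return str((int(char) + 5) % 10)
--         return char
--     decrypted_text = "".join([_rot_char(c) for c in ciphertext])
--     return [{
--         'name': 'ROT18',
--         'config': 'Alphanumeric',
--         'output': decrypted_text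
--     }]
-- ===== SOURCE B (Python) =====
-- LOWER = "abcdefghijklmnopqrstuvwxyz"
-- UPPER = "ABCDEFGHIJKLMNOPQRSTUVWXYZ"
-- DIGITS = "0123456789"
-- ROTL = LOWER[13:] + LOWER[:13]
-- ROTU = UPPER[13:] + UPPER[:13]
-- ROTD = DIGITS[5:] + DIGITS[:5]
--
-- def decode_rot18(ciphertext):
--     # pass 1: ROT13 on letters only (digits and other characters flow through)
--     stage = []
--     for ch in ciphertext:
--         i = LOWER.find(ch)
--         if i != -1:
--             stage.append(ROTL[i])
--         else:
--             j = UPPER.find(ch)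
--             stage.append(ROTU[j] if j != -1 else ch)
--     # pass 2: ROT5 on digits only
--     result = []
--     for ch in stage:
--         k = DIGITS.find(ch)
--         result.append(ROTD[k] if k != -1 else ch)
--     return [{
--         'name': 'ROT18',
--         'config': 'Alphanumeric',
--         'output': "".join(result)
--     }]
-- ===== Notes on version B (the rewrite author's own statement) =====
-- stated objective: alternative
-- what changed: Decomposes ROT18 into two staged passes (a ROT13 pass over letters, then a ROT5 pass over digits), each mapping a character by its index in the alphabet string into a sliced rotation of that string, instead of A's single pass with per-character arithmetic branches.
import Mathlib
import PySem

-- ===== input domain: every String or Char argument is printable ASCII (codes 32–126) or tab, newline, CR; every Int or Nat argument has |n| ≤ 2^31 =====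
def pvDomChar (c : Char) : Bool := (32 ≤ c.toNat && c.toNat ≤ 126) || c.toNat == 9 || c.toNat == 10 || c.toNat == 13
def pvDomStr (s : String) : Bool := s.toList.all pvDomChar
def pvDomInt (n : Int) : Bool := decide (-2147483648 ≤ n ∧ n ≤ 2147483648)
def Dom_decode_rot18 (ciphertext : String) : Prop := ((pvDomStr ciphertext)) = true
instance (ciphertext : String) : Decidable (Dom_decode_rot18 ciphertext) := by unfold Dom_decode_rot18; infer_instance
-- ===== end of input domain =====

set_option maxRecDepth 20000


-- B recasts ROT18 as two staged passes — a ROT13 pass over letters, then a ROT5 pass over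
-- digits — mapping by index lookup (str.find) into sliced rotations of the alphabet strings,
-- instead of A's single pass with per-character arithmetic branches; same output (alternative).

-- ===== PORT A =====
-- A's inner _rot_char: three range branches, identity otherwise.
def pvRotChar (c : Char) : Char :=
  if 'a' ≤ c ∧ c ≤ 'z' then Char.ofNat ((c.toNat - 'a'.toNat + 13) % 26 + 'a'.toNat)
  else if 'A' ≤ c ∧ c ≤ 'Z' then Char.ofNat ((c.toNat - 'A'.toNat + 13) % 26 + 'A'.toNat)
  else if '0' ≤ c ∧ c ≤ '9' then
    -- str((int(char) + 5) % 10): the digit's value is c - '0', result re-rendered as a digit char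
    Char.ofNat ((c.toNat - '0'.toNat + 5) % 10 + '0'.toNat)
  else c

def decode_rot18 (ciphertext : String) : List (List (String × String)) :=
  [[("name", "ROT18"), ("config", "Alphanumeric"),
    ("output", String.ofList (ciphertext.toList.map pvRotChar))]]

-- ===== PORT B =====
-- (strings are carried as List Char — the PySem.Chars side — so the ports stay kernel-reducible)
def pvLOWER : List Char := "abcdefghijklmnopqrstuvwxyz".toList
def pvUPPER : List Char := "ABCDEFGHIJKLMNOPQRSTUVWXYZ".toList
def pvDIGITS : List Char := "0123456789".toList
-- ROTL = LOWER[13:] + LOWER[:13], etc.: the sliced rotations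
def pvROTL : List Char := PySem.List.slice pvLOWER (some 13) none ++ PySem.List.slice pvLOWER none (some 13)
def pvROTU : List Char := PySem.List.slice pvUPPER (some 13) none ++ PySem.List.slice pvUPPER none (some 13)
def pvROTD : List Char := PySem.List.slice pvDIGITS (some 5) none ++ PySem.List.slice pvDIGITS none (some 5)

-- pass-1 body: i = LOWER.find(ch); ROTL[i] if i != -1 else (j = UPPER.find(ch); ROTU[j] if j != -1 else ch)
-- (the indexings ROTL[i]/ROTU[j] are guarded by i,j ≠ -1, so they never raise; the getD c branch is unreachable)
def pvStage1 (c : Char) : Char :=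
  let i := PySem.Chars.find pvLOWER [c]
  if i ≠ -1 then (PySem.List.pyGet? pvROTL i).getD c
  else
    let j := PySem.Chars.find pvUPPER [c]
    if j ≠ -1 then (PySem.List.pyGet? pvROTU j).getD c else c

-- pass-2 body: k = DIGITS.find(ch); ROTD[k] if k != -1 else ch
def pvStage2 (c : Char) : Char :=
  let k := PySem.Chars.find pvDIGITS [c]
  if k ≠ -1 then (PySem.List.pyGet? pvROTD k).getD c else c

def decode_rot18_alt (ciphertext : String) : List (List (String × String)) :=
  let stage := ciphertext.toList.map pvStage1
  let result := stage.map pvStage2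
  [[("name", "ROT18"), ("config", "Alphanumeric"),
    ("output", String.ofList result)]]

-- ===== PRECONDITION & SPEC =====
def Spec_decode_rot18 (ciphertext : String) (out : List (List (String × String))) : Prop := out = decode_rot18_alt ciphertext
instance (ciphertext : String) (out : List (List (String × String))) : Decidable (Spec_decode_rot18 ciphertext out) := by unfold Spec_decode_rot18; infer_instance

-- ===== CLAIM (what is proved, stated in full; the proofs are below) =====
def Claim_equal_decode_rot18 : Prop := ∀ (ciphertext : String), Dom_decode_rot18 ciphertext → Spec_decode_rot18 ciphertext (decode_rot18 ciphertext)

-- ===== LEMMAS AND PROOFS =====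

-- pointwise: the two staged passes agree with A's branch function on the ASCII range
theorem pvRot_pointwise : ∀ n < 128, pvStage2 (pvStage1 (Char.ofNat n)) = pvRotChar (Char.ofNat n) := by
  decide

theorem pvRot_char (c : Char) (h : pvDomChar c = true) :
    pvStage2 (pvStage1 c) = pvRotChar c := by
  have hn : c.toNat < 128 := by
    unfold pvDomChar at h
    simp only [Bool.or_eq_true, Bool.and_eq_true, decide_eq_true_eq, beq_iff_eq] at h
    omega
  have := pvRot_pointwise c.toNat hn
  simpa [Char.ofNat_toNat] using this

-- ===== VERDICT (by name: the statement is the Claim_ definition above) =====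
theorem decode_rot18_spec : Claim_equal_decode_rot18 := by
  intro ct h
  unfold Spec_decode_rot18 decode_rot18 decode_rot18_alt
  have : (ct.toList.map pvStage1).map pvStage2 = ct.toList.map pvRotChar := by
    rw [List.map_map]
    apply List.map_congr_left
    intro c hc
    exact pvRot_char c (List.all_eq_true.mp h c hc)
  simp only [this]
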